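-- pv_equiv track=rewrite | github.com/hong-sh/coding_test_practice | samsung_practice/xy_sentence2.py | dfs
-- ===== SOURCE A (Python) =====
-- def dfs(sentence, goal_sentence, memo):
--     if len(sentence) == len(goal_sentence):
--         return sentence == goal_sentence
--
--     #if sentence in memo:
--     #    return memo[sentence]
--
--     #sentence1 = sentence + 'X'
--     #sentence2 = sentence + 'Y'
--     #sentence2 = sentence2[::-1]
--
--     is_possible = False
--     if goal_sentence[0] == 'Y':
--         is_possible = is_possible or dfs(sentence, goal_sentence[::-1][:-1], memo)
--     if goal_sentence[-1] == 'X':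
--         is_possible = is_possible or dfs(sentence, goal_sentence[:-1], memo)
--
--     #is_possible = dfs(sentence, goal_sentence, memo) or dfs(sentence, goal_sentence, memo)
--     #memo[sentence] = is_possible
--     return is_possible
-- ===== SOURCE B (Python) =====
-- def dfs(sentence, goal_sentence, memo):
--     n = len(sentence)
--     m = len(goal_sentence)
--     if m < n:
--         return False
--     # BFS over goal states represented as intervals with a direction flag:
--     # (i, j, rev) stands for goal_sentence[i:j], reversed when rev is true.
--     frontier = {(0, m, False)}
--     for _ in range(m - n):
--         nxt = set()
--         for (i, j, rev) in frontier:
--             if not rev: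
--                 if goal_sentence[i] == 'Y':
--                     nxt.add((i + 1, j, True))
--                 if goal_sentence[j - 1] == 'X':
--                     nxt.add((i, j - 1, False))
--             else:
--                 if goal_sentence[j - 1] == 'Y':
--                     nxt.add((i, j - 1, False))
--                 if goal_sentence[i] == 'X':
--                     nxt.add((i + 1, j, True))
--         frontier = nxt
--     for (i, j, rev) in frontier:
--         part = goal_sentence[i:j]
--         if rev:
--             part = part[::-1]
--         if part == sentence:
--             return True
--     return False
-- ===== Notes on version B (the rewrite author's own statement) =====
-- stated objective: alternative
-- what changed: A recursively explores every peel path of the goal string (worst-case exponential DFS with string slicing); B runs an iterative level-by-level BFS over a deduplicating SET of interval-plus-direction goal states (i, j, rev), merging coinciding states so the state space is polynomial, and copies no string inside the loop; Pre_ excludes exactly the inputs (longer sentence, goal an all-X/Y string that is empty, starts with 'Y' or is all 'X') on which A's peeling empties the goal and raises IndexError.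
import Mathlib
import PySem

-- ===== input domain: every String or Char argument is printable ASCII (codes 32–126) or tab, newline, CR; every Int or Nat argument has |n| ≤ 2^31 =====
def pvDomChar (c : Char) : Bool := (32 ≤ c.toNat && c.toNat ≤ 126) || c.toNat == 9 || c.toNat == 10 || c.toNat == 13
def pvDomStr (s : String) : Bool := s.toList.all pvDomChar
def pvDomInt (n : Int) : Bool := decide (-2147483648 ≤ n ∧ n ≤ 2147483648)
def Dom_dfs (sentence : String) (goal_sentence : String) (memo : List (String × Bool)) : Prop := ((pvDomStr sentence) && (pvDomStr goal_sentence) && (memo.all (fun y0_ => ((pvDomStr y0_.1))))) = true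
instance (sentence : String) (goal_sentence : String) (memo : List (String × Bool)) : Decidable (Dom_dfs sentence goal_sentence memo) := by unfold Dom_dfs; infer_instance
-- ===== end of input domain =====

-- B replaces A's recursive DFS over goal strings by an iterative level-by-level
-- BFS over a deduplicating SET of interval-plus-direction goal states (i, j, rev),
-- merging coinciding states and copying no string inside the loop.
-- 'memo' is dead in A and stays dead in B.

-- ===== PORT A =====
-- A's recursion, on List Char ('[::-1]' = List.reverse, '[:-1]' = List.dropLast — exact;
-- goal_sentence[0] / [-1] via PySem.List.pyGet?: 'some c' exactly where Python returns c).
def dfsA (s g : List Char) : Bool :=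
  if s.length = g.length then s == g
  else
    -- is_possible = False; first 'if', then second 'if' with short-circuit 'or'
    let ip1 : Bool :=
      if _h : PySem.List.pyGet? g 0 = some 'Y' then false || dfsA s g.reverse.dropLast
      else false
    if _h2 : PySem.List.pyGet? g (-1) = some 'X' then ip1 || dfsA s g.dropLast
    else ip1
termination_by g.length
decreasing_by
  · have hg : g ≠ [] := by intro e; subst e; simp [PySem.List.pyGet?] at _h
    simpa using Nat.sub_lt (List.length_pos_iff.mpr hg) one_pos
  · have hg : g ≠ [] := by intro e; subst e; simp [PySem.List.pyGet?] at _h2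
    simpa using Nat.sub_lt (List.length_pos_iff.mpr hg) one_pos

def dfs (sentence : String) (goal_sentence : String) (memo : List (String × Bool)) : Bool :=
  dfsA sentence.toList goal_sentence.toList

-- ===== PORT B =====
-- one frontier state (i, j, rev) processed: add its (at most two) successor states
-- ('if not rev: …  else: …' of Source B; goal_sentence[i] / [j-1] via PySem.List.pyGet?)
def stepSet (g : List Char) (nxt : PySem.Set (Int × Int × Bool)) (st : Int × Int × Bool) : PySem.Set (Int × Int × Bool) :=
  if st.2.2 = false then
    let nxt1 := if PySem.List.pyGet? g st.1 = some 'Y' then PySem.Set.add nxt (st.1 + 1, st.2.1, true) else nxt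
    if PySem.List.pyGet? g (st.2.1 - 1) = some 'X' then PySem.Set.add nxt1 (st.1, st.2.1 - 1, false) else nxt1
  else
    let nxt1 := if PySem.List.pyGet? g (st.2.1 - 1) = some 'Y' then PySem.Set.add nxt (st.1, st.2.1 - 1, false) else nxt
    if PySem.List.pyGet? g st.1 = some 'X' then PySem.Set.add nxt1 (st.1 + 1, st.2.1, true) else nxt1

-- 'part = goal_sentence[i:j]; if rev: part = part[::-1]' of Source B
def partOf (g : List Char) (st : Int × Int × Bool) : List Char :=
  if st.2.2 then (PySem.List.slice g (some st.1) (some st.2.1)).reverse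
  else PySem.List.slice g (some st.1) (some st.2.1)

def dfsAltCore (s g : List Char) : Bool :=
  if g.length < s.length then false
  else
    let frontier : PySem.Set (Int × Int × Bool) := PySem.Set.ofList [((0 : Int), (g.length : Int), false)]
    -- for _ in range(m - n): frontier = {successor states of frontier}
    let final := (PySem.List.pyRange 0 ((g.length : Int) - (s.length : Int)) 1).foldl
      (fun fr _ => fr.foldl (stepSet g) PySem.Set.empty) frontier
    -- final 'for … in frontier: if part == sentence: return True / return False' = any
    -- (order-independent over the set)
    final.any (fun st => partOf g st == s)

def dfs_alt (sentence : String) (goal_sentence : String) (memo : List (String × Bool)) : Bool :=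
  dfsAltCore sentence.toList goal_sentence.toList

-- ===== PRECONDITION & SPEC =====
-- Pre_ excludes exactly the inputs on which A raises IndexError (its backward peeling
-- reaches an empty goal and evaluates goal_sentence[0] on it): len(sentence) >
-- len(goal_sentence) with a goal made only of 'X'/'Y' that is empty, starts with 'Y',
-- or is all 'X'.  On every input where A returns a value, Pre_ holds; B returns False
-- on the excluded inputs.
def Pre_dfs (sentence : String) (goal_sentence : String) (memo : List (String × Bool)) : Prop :=
  ¬ (goal_sentence.toList.length < sentence.toList.length ∧
     (∀ c ∈ goal_sentence.toList, c = 'X' ∨ c = 'Y') ∧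
     (goal_sentence.toList = [] ∨ goal_sentence.toList.head? = some 'Y' ∨
      ∀ c ∈ goal_sentence.toList, c = 'X'))
instance (sentence : String) (goal_sentence : String) (memo : List (String × Bool)) : Decidable (Pre_dfs sentence goal_sentence memo) := by unfold Pre_dfs; infer_instance

def pvWitness_dfs : String × String × (List (String × Bool)) := ("X", "YX", [])

def Spec_dfs (sentence : String) (goal_sentence : String) (memo : List (String × Bool)) (out : Bool) : Prop := out = dfs_alt sentence goal_sentence memo
instance (sentence : String) (goal_sentence : String) (memo : List (String × Bool)) (out : Bool) : Decidable (Spec_dfs sentence goal_sentence memo out) := by unfold Spec_dfs; infer_instance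

-- ===== CLAIM (what is proved, stated in full; the proofs are below) =====
def Claim_equal_dfs : Prop := ∀ (sentence : String) (goal_sentence : String) (memo : List (String × Bool)), Dom_dfs sentence goal_sentence memo → Pre_dfs sentence goal_sentence memo → Spec_dfs sentence goal_sentence memo (dfs sentence goal_sentence memo)

-- ===== LEMMAS AND PROOFS =====

-- the (at most two) successor goal strings A recurses on
def succs (t : List Char) : List (List Char) :=
  (if PySem.List.pyGet? t 0 = some 'Y' then [t.reverse.dropLast] else []) ++
  (if PySem.List.pyGet? t (-1) = some 'X' then [t.dropLast] else [])

-- the same successors on B's interval states, as a list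
def stSuccs (g : List Char) (st : Int × Int × Bool) : List (Int × Int × Bool) :=
  if st.2.2 = false then
    (if PySem.List.pyGet? g st.1 = some 'Y' then [(st.1 + 1, st.2.1, true)] else []) ++
    (if PySem.List.pyGet? g (st.2.1 - 1) = some 'X' then [(st.1, st.2.1 - 1, false)] else [])
  else
    (if PySem.List.pyGet? g (st.2.1 - 1) = some 'Y' then [(st.1, st.2.1 - 1, false)] else []) ++
    (if PySem.List.pyGet? g st.1 = some 'X' then [(st.1 + 1, st.2.1, true)] else [])

def expand (g : List Char) (fr : PySem.Set (Int × Int × Bool)) : PySem.Set (Int × Int × Bool) :=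
  fr.foldl (stepSet g) PySem.Set.empty

-- frontier invariant: a state is a Nat interval of length L inside g
def StInv (g : List Char) (L : Nat) (st : Int × Int × Bool) : Prop :=
  ∃ a b : Nat, st.1 = (a : Int) ∧ st.2.1 = (b : Int) ∧ a ≤ b ∧ b ≤ g.length ∧ b - a = L

lemma dfsA_ne {s t : List Char} (h : s.length ≠ t.length) :
    dfsA s t = (succs t).any (dfsA s) := by
  rw [dfsA, if_neg h]
  unfold succs
  split_ifs <;> simp

lemma succs_mem_length {t t' : List Char} (h : t' ∈ succs t) : t'.length + 1 = t.length := by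
  unfold succs at h
  rcases List.mem_append.1 h with h1 | h1 <;> split_ifs at h1 with hc
  · have hg : t ≠ [] := by intro e; subst e; simp [PySem.List.pyGet?] at hc
    simp_all [Nat.sub_add_cancel (List.length_pos_iff.mpr hg)]
  · simp at h1
  · have hg : t ≠ [] := by intro e; subst e; simp [PySem.List.pyGet?] at hc
    simp_all [Nat.sub_add_cancel (List.length_pos_iff.mpr hg)]
  · simp at h1

lemma dfsA_short (s : List Char) : ∀ n (t : List Char), t.length = n → t.length < s.length →
    dfsA s t = false := by
  intro n
  induction n using Nat.strong_induction_on with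
  | _ n ih =>
    intro t ht hlt
    rw [dfsA_ne (by omega)]
    rw [List.any_eq_false]
    intro t' ht'
    have hl := succs_mem_length ht'
    have := ih t'.length (by omega) t' rfl (by omega)
    simp [this]

lemma dfsA_eq_len {s t : List Char} (h : s.length = t.length) : dfsA s t = (s == t) := by
  rw [dfsA, if_pos h]

lemma mem_stepSet {g : List Char} {nxt : PySem.Set (Int × Int × Bool)} {st st' : Int × Int × Bool} :
    st' ∈ stepSet g nxt st ↔ st' ∈ nxt ∨ st' ∈ stSuccs g st := by
  unfold stepSet stSuccs
  split_ifs <;> simp [PySem.Set.mem_add] <;> tauto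

lemma mem_foldl_stepSet {g : List Char} {fr : List (Int × Int × Bool)} :
    ∀ {init : PySem.Set (Int × Int × Bool)} {st' : Int × Int × Bool},
    st' ∈ fr.foldl (stepSet g) init ↔ st' ∈ init ∨ ∃ st ∈ fr, st' ∈ stSuccs g st := by
  induction fr with
  | nil => simp
  | cons x xs ih =>
    intro init st'
    simp only [List.foldl_cons, ih, mem_stepSet, List.mem_cons]
    constructor
    · rintro ((h | h) | ⟨t, ht, h⟩)
      · exact Or.inl h
      · exact Or.inr ⟨x, Or.inl rfl, h⟩
      · exact Or.inr ⟨t, Or.inr ht, h⟩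
    · rintro (h | ⟨t, (rfl | ht), h⟩)
      · exact Or.inl (Or.inl h)
      · exact Or.inl (Or.inr h)
      · exact Or.inr ⟨t, ht, h⟩

lemma mem_expand {g : List Char} {fr : PySem.Set (Int × Int × Bool)} {st' : Int × Int × Bool} :
    st' ∈ expand g fr ↔ ∃ st ∈ fr, st' ∈ stSuccs g st := by
  unfold expand
  rw [mem_foldl_stepSet]
  simp [PySem.Set.empty]

-- segment arithmetic for g[a:b] = (g.drop a).take (b - a)
lemma seg_head (g : List Char) (a b : Nat) (hab : a < b) (hb : b ≤ g.length) :
    ((g.drop a).take (b - a)).head? = g[a]? := by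
  rw [List.head?_eq_getElem?, List.getElem?_take_of_lt (by omega), List.getElem?_drop]
  simp

lemma seg_length (g : List Char) (a b : Nat) (hab : a ≤ b) (hb : b ≤ g.length) :
    ((g.drop a).take (b - a)).length = b - a := by
  simp only [List.length_take, List.length_drop]
  omega

lemma seg_last (g : List Char) (a b : Nat) (hab : a < b) (hb : b ≤ g.length) :
    ((g.drop a).take (b - a)).getLast? = g[b - 1]? := by
  rw [List.getLast?_eq_getElem?, seg_length g a b (by omega) hb,
      List.getElem?_take_of_lt (by omega), List.getElem?_drop]
  congr 1
  omega

lemma seg_dropLast (g : List Char) (a b : Nat) (hab : a < b) (hb : b ≤ g.length) :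
    ((g.drop a).take (b - a)).dropLast = (g.drop a).take (b - 1 - a) := by
  rw [List.dropLast_eq_take, seg_length g a b (by omega) hb, List.take_take]
  congr 1
  omega

lemma seg_tail (g : List Char) (a b : Nat) :
    ((g.drop a).take (b - a)).tail = (g.drop (a + 1)).take (b - (a + 1)) := by
  rw [← List.drop_one, List.drop_take, List.drop_drop,
      show b - a - 1 = b - (a + 1) by omega]

lemma partOf_nat (g : List Char) (a b : Nat) (r : Bool) :
    partOf g ((a : Int), (b : Int), r) =
      if r then ((g.drop a).take (b - a)).reverse else (g.drop a).take (b - a) := by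
  unfold partOf
  simp [PySem.List.slice_natCast]

lemma length_partOf (g : List Char) (a b : Nat) (r : Bool) (hab : a ≤ b) (hb : b ≤ g.length) :
    (partOf g ((a : Int), (b : Int), r)).length = b - a := by
  rw [partOf_nat]
  split_ifs
  · rw [List.length_reverse]; exact seg_length g a b hab hb
  · exact seg_length g a b hab hb


lemma stSuccs_map (g : List Char) (a b : Nat) (r : Bool) (hab : a < b) (hb : b ≤ g.length) :
    (stSuccs g ((a : Int), (b : Int), r)).map (partOf g) =
      succs (partOf g ((a : Int), (b : Int), r)) := by
  have hb1 : ((b : Int)) - 1 = ((b - 1 : Nat) : Int) := by omega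
  have ha1 : ((a : Int)) + 1 = ((a + 1 : Nat) : Int) := by omega
  have hgb : PySem.List.pyGet? g ((b : Int) - 1) = g[b - 1]? := by
    rw [hb1, PySem.List.pyGet?_natCast]
  have hga : PySem.List.pyGet? g ((a : Int)) = g[a]? := PySem.List.pyGet?_natCast g a
  have hEY : partOf g ((a : Int) + 1, (b : Int), true) =
      (((g.drop a).take (b - a)).reverse).dropLast := by
    rw [ha1, partOf_nat, if_pos rfl, List.dropLast_reverse, seg_tail]
  have hEX : partOf g ((a : Int), (b : Int) - 1, false) =
      ((g.drop a).take (b - a)).dropLast := by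
    rw [hb1, partOf_nat, if_neg (by simp), seg_dropLast g a b hab hb]
  cases r with
  | false =>
    rw [partOf_nat, if_neg (by simp)]
    unfold stSuccs succs
    dsimp only
    rw [if_pos rfl, PySem.List.pyGet?_zero, ← List.head?_eq_getElem?, seg_head g a b hab hb,
        PySem.List.pyGet?_neg_one, seg_last g a b hab hb, hga, hgb]
    split_ifs <;> simp only [List.map_append, List.map_cons, List.map_nil, hEY, hEX]
  | true =>
    rw [partOf_nat, if_pos rfl]
    unfold stSuccs succs
    dsimp only
    rw [if_neg (by simp), PySem.List.pyGet?_zero, ← List.head?_eq_getElem?, List.head?_reverse,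
        seg_last g a b hab hb, PySem.List.pyGet?_neg_one, List.getLast?_reverse,
        seg_head g a b hab hb, hga, hgb]
    split_ifs <;> simp only [List.map_append, List.map_cons, List.map_nil, hEY, hEX,
      List.reverse_reverse]

lemma stSuccs_shape {g : List Char} {st st' : Int × Int × Bool} (hmem : st' ∈ stSuccs g st) :
    st' = (st.1 + 1, st.2.1, true) ∨ st' = (st.1, st.2.1 - 1, false) := by
  unfold stSuccs at hmem
  split_ifs at hmem <;> simp at hmem <;> tauto

lemma stSuccs_inv {g : List Char} {L : Nat} {st st' : Int × Int × Bool}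
    (hinv : StInv g L st) (hL : 1 ≤ L) (hmem : st' ∈ stSuccs g st) : StInv g (L - 1) st' := by
  rcases hinv with ⟨a, b, h1, h2, hab, hb, hL'⟩
  rcases stSuccs_shape hmem with h | h
  · refine ⟨a + 1, b, ?_, ?_, by omega, hb, by omega⟩
    · rw [h]; show st.1 + 1 = ((a + 1 : Nat) : Int); rw [h1]; omega
    · rw [h]; show st.2.1 = (b : Int); exact h2
  · refine ⟨a, b - 1, ?_, ?_, by omega, by omega, by omega⟩
    · rw [h]; show st.1 = (a : Int); exact h1
    · rw [h]; show st.2.1 - 1 = ((b - 1 : Nat) : Int); rw [h2]; omega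

lemma expand_any {s g : List Char} {L : Nat} {fr : PySem.Set (Int × Int × Bool)}
    (hinv : ∀ st ∈ fr, StInv g L st) (hL : s.length < L) :
    (expand g fr).any (fun st => dfsA s (partOf g st)) =
      fr.any (fun st => dfsA s (partOf g st)) := by
  have hsucc : ∀ st ∈ fr, dfsA s (partOf g st) =
      (stSuccs g st).any (fun st' => dfsA s (partOf g st')) := by
    intro st hst
    obtain ⟨i, j, r⟩ := st
    rcases hinv _ hst with ⟨a, b, h1, h2, hab, hb, hL'⟩
    dsimp at h1 h2
    subst h1; subst h2
    rw [dfsA_ne (by rw [length_partOf g a b _ hab hb]; omega),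
        ← stSuccs_map g a b r (by omega) hb, List.any_map]
    rfl
  rw [Bool.eq_iff_iff]
  simp only [List.any_eq_true]
  constructor
  · rintro ⟨st', hst', hd⟩
    rcases mem_expand.1 hst' with ⟨st, hst, hs⟩
    refine ⟨st, hst, ?_⟩
    rw [hsucc st hst, List.any_eq_true]
    exact ⟨st', hs, hd⟩
  · rintro ⟨st, hst, hd⟩
    rw [hsucc st hst, List.any_eq_true] at hd
    rcases hd with ⟨st', hs, hd⟩
    exact ⟨st', mem_expand.2 ⟨st, hst, hs⟩, hd⟩

lemma iter_expand (s g : List Char) : ∀ (K : Nat) (fr : PySem.Set (Int × Int × Bool)),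
    (∀ st ∈ fr, StInv g (s.length + K) st) →
    ((expand g)^[K] fr).any (fun st => dfsA s (partOf g st)) =
      fr.any (fun st => dfsA s (partOf g st)) ∧
    (∀ st ∈ (expand g)^[K] fr, StInv g s.length st) := by
  intro K
  induction K with
  | zero => intro fr h; simpa using h
  | succ k ih =>
    intro fr h
    rw [Function.iterate_succ_apply]
    have hinv' : ∀ st' ∈ expand g fr, StInv g (s.length + k) st' := by
      intro st' hst'
      rcases mem_expand.1 hst' with ⟨st, hst, hs⟩
      have h' := stSuccs_inv (h st hst) (by omega) hs
      rwa [show s.length + (k + 1) - 1 = s.length + k by omega] at h'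
    rcases ih (expand g fr) hinv' with ⟨h1, h2⟩
    exact ⟨h1.trans (expand_any h (by omega)), h2⟩

lemma foldl_expand (g : List Char) (l : List Int) (i : PySem.Set (Int × Int × Bool)) :
    l.foldl (fun fr _ => fr.foldl (stepSet g) PySem.Set.empty) i = (expand g)^[l.length] i := by
  induction l generalizing i with
  | nil => rfl
  | cons x xs ih =>
    rw [List.foldl_cons, ih]
    rfl

lemma core_eq (s g : List Char) : dfsA s g = dfsAltCore s g := by
  unfold dfsAltCore
  split_ifs with hlt
  · exact dfsA_short s g.length g rfl hlt
  · show dfsA s g = ((PySem.List.pyRange 0 ((g.length : Int) - (s.length : Int)) 1).foldl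
      (fun fr _ => fr.foldl (stepSet g) PySem.Set.empty)
      (PySem.Set.ofList [((0 : Int), (g.length : Int), false)])).any
        (fun st => partOf g st == s)
    have hK : ((g.length : Int) - (s.length : Int)) = ((g.length - s.length : Nat) : Int) := by
      omega
    rw [hK, PySem.List.pyRange_zero_natCast, foldl_expand]
    simp only [List.length_map, List.length_range]
    set K := g.length - s.length with hKdef
    have hg1 : PySem.Set.ofList [((0 : Int), (g.length : Int), false)]
        = [((0 : Int), (g.length : Int), false)] := rfl
    have hfr : ∀ st ∈ PySem.Set.ofList [((0 : Int), (g.length : Int), false)],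
        StInv g (s.length + K) st := by
      intro st hst
      rw [hg1, List.mem_singleton] at hst
      subst hst
      exact ⟨0, g.length, rfl, rfl, by omega, le_refl _, by omega⟩
    rcases iter_expand s g K (PySem.Set.ofList [((0 : Int), (g.length : Int), false)]) hfr
      with ⟨h1, h2⟩
    have hpart0 : partOf g ((0 : Int), (g.length : Int), false) = g := by
      have h0 := partOf_nat g 0 g.length false
      simpa using h0
    have h4 : (PySem.Set.ofList [((0 : Int), (g.length : Int), false)]).any
        (fun st => dfsA s (partOf g st)) = dfsA s g := by
      rw [hg1]
      simp [hpart0]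
    rw [h4] at h1
    rw [← h1, Bool.eq_iff_iff]
    simp only [List.any_eq_true]
    have key : ∀ st ∈ (expand g)^[K] (PySem.Set.ofList [((0 : Int), (g.length : Int), false)]),
        dfsA s (partOf g st) = (partOf g st == s) := by
      intro st hst
      obtain ⟨i, j, r⟩ := st
      rcases h2 _ hst with ⟨a, b, h1', h2', hab, hb, hL⟩
      dsimp at h1' h2'
      subst h1'; subst h2'
      rw [dfsA_eq_len (by rw [length_partOf g a b _ hab hb]; omega)]
      exact BEq.comm ..
    constructor
    · rintro ⟨st, hst, hd⟩
      exact ⟨st, hst, by rw [← key st hst]; exact hd⟩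
    · rintro ⟨st, hst, hd⟩
      exact ⟨st, hst, by rw [key st hst]; exact hd⟩

-- ===== VERDICT (by name: the statement is the Claim_ definition above) =====
theorem dfs_spec : Claim_equal_dfs := by
  intro sentence goal_sentence memo _ _
  unfold Spec_dfs dfs dfs_alt
  exact core_eq sentence.toList goal_sentence.toList
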